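-- pv_equiv track=rewrite | github.com/MatiasBS027/TEC | I SEMESTRE/Introduccion a la Programacion/Examenes/Examen1.py | obtenerValores
-- ===== SOURCE A (Python) =====
-- def esPar(num):
--     if num % 2 == 0:
--         return True
--     else:
--         return False
--
-- def obtenerValores(pnum1, pnum2, pnum3):
--     nCifra = 0  # Lo tuve que inicializar fuera del ciclo
--     cifra = pnum1//(10**(pnum2-1))
--     muliplicador = 0
--     if pnum3 == 0:
--         while cifra > 0:
--             if esPar(cifra%10) == True:
--                 nCifra += (cifra%10)*10**muliplicador
--                 muliplicador += 1
--             cifra //= 10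
--     else:
--         while cifra > 0:
--             if esPar(cifra%10) == False:
--                 nCifra += (cifra%10)*10**muliplicador
--                 muliplicador += 1
--             cifra //= 10
--     return nCifra
-- ===== SOURCE B (Python) =====
-- def obtenerValores(pnum1, pnum2, pnum3):
--     cifra = pnum1 // 10 ** (pnum2 - 1)
--     if cifra <= 0:
--         return 0
--     keep = "02468" if pnum3 == 0 else "13579"
--     n = 0
--     for ch in str(cifra):
--         if ch in keep:
--             n = n * 10 + ord(ch) - 48
--     return n
-- ===== Notes on version B (the rewrite author's own statement) =====
-- stated objective: simpler
-- what changed: Replaces A's two least-significant-first mod/div loops with positional power-of-ten accumulators by a single forward pass over the decimal string of cifra that keeps the wanted-parity digit characters and rebuilds the number as n = n*10 + digit.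
-- outside the precondition, e.g. on obtenerValores(24, 0, 0): A returns 2.0, B returns 20
import Mathlib
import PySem

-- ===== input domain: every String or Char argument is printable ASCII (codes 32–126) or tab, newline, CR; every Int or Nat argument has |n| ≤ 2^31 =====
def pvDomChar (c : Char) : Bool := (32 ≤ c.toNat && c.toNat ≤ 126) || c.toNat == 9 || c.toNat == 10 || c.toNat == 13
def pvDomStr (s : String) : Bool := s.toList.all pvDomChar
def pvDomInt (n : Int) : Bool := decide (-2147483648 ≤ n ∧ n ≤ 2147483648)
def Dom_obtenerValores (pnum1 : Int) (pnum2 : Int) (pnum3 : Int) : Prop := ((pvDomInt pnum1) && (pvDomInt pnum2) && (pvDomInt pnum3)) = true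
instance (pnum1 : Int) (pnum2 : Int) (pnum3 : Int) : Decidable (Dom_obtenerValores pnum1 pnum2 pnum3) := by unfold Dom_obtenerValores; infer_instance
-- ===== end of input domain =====

-- B replaces A's two least-significant-first mod/div loops with power-of-ten accumulators by a
-- single forward pass over the decimal string of cifra (simpler decomposition, same cost).


-- ===== PORT A =====
def esPar (num : Int) : Bool :=
  if PySem.Int.mod num 2 == 0 then true else false

-- termination helper for A's while loops (cited by decreasing_by)
theorem pvFdiv10_toNat_lt (c : Int) (h : 0 < c) :
    (PySem.Int.floordiv c 10).toNat < c.toNat := by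
  have h : PySem.Int.floordiv c 10 = c / 10 := by
    show Int.fdiv _ _ = _
    rw [Int.fdiv_eq_ediv]
    norm_num
  rw [h]
  omega

-- A's 'while cifra > 0' loop in the pnum3 == 0 branch
def loopEven (cifra nCifra : Int) (mult : Nat) : Int :=
  if h : cifra > 0 then
    if esPar (PySem.Int.mod cifra 10) == true then
      loopEven (PySem.Int.floordiv cifra 10)
        (nCifra + (PySem.Int.mod cifra 10) * 10 ^ mult) (mult + 1)
    else
      loopEven (PySem.Int.floordiv cifra 10) nCifra mult
  else nCifra
termination_by cifra.toNat
decreasing_by all_goals exact pvFdiv10_toNat_lt cifra h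

-- A's 'while cifra > 0' loop in the else branch
def loopOdd (cifra nCifra : Int) (mult : Nat) : Int :=
  if h : cifra > 0 then
    if esPar (PySem.Int.mod cifra 10) == false then
      loopOdd (PySem.Int.floordiv cifra 10)
        (nCifra + (PySem.Int.mod cifra 10) * 10 ^ mult) (mult + 1)
    else
      loopOdd (PySem.Int.floordiv cifra 10) nCifra mult
  else nCifra
termination_by cifra.toNat
decreasing_by all_goals exact pvFdiv10_toNat_lt cifra h

def obtenerValores (pnum1 : Int) (pnum2 : Int) (pnum3 : Int) : Int :=
  -- 10**(pnum2-1): exact for pnum2 ≥ 1 (Pre_); Python yields a float for pnum2 < 1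
  let cifra := PySem.Int.floordiv pnum1 (10 ^ (pnum2 - 1).toNat)
  if pnum3 == 0 then loopEven cifra 0 0 else loopOdd cifra 0 0

-- ===== PORT B =====
def obtenerValores_alt (pnum1 : Int) (pnum2 : Int) (pnum3 : Int) : Int :=
  let cifra := PySem.Int.floordiv pnum1 (10 ^ (pnum2 - 1).toNat)
  if cifra ≤ 0 then 0
  else
    -- 'ch in keep' on a single character = list membership; ord(ch) - 48 = ch.toNat - 48
    let keep := if pnum3 == 0 then ['0','2','4','6','8'] else ['1','3','5','7','9']
    (PySem.Int.toChars cifra).foldl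
      (fun n ch => if keep.contains ch then n * 10 + (ch.toNat : Int) - 48 else n) 0

-- ===== PRECONDITION & SPEC =====
-- Pre_ excludes pnum2 < 1, where Python's 10**(pnum2-1) is a float and A returns a float
-- (or an accidental int 0), not a value of the declared int type.
def Pre_obtenerValores (pnum1 : Int) (pnum2 : Int) (pnum3 : Int) : Prop := 1 ≤ pnum2
instance (pnum1 : Int) (pnum2 : Int) (pnum3 : Int) : Decidable (Pre_obtenerValores pnum1 pnum2 pnum3) := by unfold Pre_obtenerValores; infer_instance
def pvWitness_obtenerValores : Int × Int × Int := (123456, 3, 0)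

def Spec_obtenerValores (pnum1 : Int) (pnum2 : Int) (pnum3 : Int) (out : Int) : Prop := out = obtenerValores_alt pnum1 pnum2 pnum3
instance (pnum1 : Int) (pnum2 : Int) (pnum3 : Int) (out : Int) : Decidable (Spec_obtenerValores pnum1 pnum2 pnum3 out) := by unfold Spec_obtenerValores; infer_instance

-- ===== CLAIM (what is proved, stated in full; the proofs are below) =====
def Claim_equal_obtenerValores : Prop := ∀ (pnum1 : Int) (pnum2 : Int) (pnum3 : Int), Dom_obtenerValores pnum1 pnum2 pnum3 → Pre_obtenerValores pnum1 pnum2 pnum3 → Spec_obtenerValores pnum1 pnum2 pnum3 (obtenerValores pnum1 pnum2 pnum3)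

-- ===== LEMMAS AND PROOFS =====

-- value of a digit list (little-endian), keeping only digits of the selected parity
def keptVal (keepEven : Bool) (l : List Nat) : Int :=
  l.foldr (fun (d : Nat) (acc : Int) =>
    if (decide (d % 2 = 0)) == keepEven then (d : Int) + 10 * acc else acc) 0

theorem keptVal_cons (b : Bool) (d : Nat) (l : List Nat) :
    keptVal b (d :: l) =
      if (decide (d % 2 = 0)) == b then (d : Int) + 10 * keptVal b l else keptVal b l := rfl

theorem fdiv_cast10 (k : Nat) :
    PySem.Int.floordiv (k : Int) 10 = ((k / 10 : Nat) : Int) := by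
  have h : PySem.Int.floordiv (k : Int) 10 = (k : Int) / 10 := by
    show Int.fdiv _ _ = _
    rw [Int.fdiv_eq_ediv]
    norm_num
  rw [h]
  omega

theorem fmod_cast10 (k : Nat) :
    PySem.Int.mod (k : Int) 10 = ((k % 10 : Nat) : Int) := by
  have h : PySem.Int.mod (k : Int) 10 = (k : Int) % 10 := by
    show Int.fmod _ _ = _
    rw [Int.fmod_eq_emod]
    norm_num
  rw [h]
  omega

theorem esPar_cast (m : Nat) : esPar (m : Int) = decide (m % 2 = 0) := by
  have h2 : PySem.Int.mod (m : Int) 2 = ((m % 2 : Nat) : Int) := by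
    have h : PySem.Int.mod (m : Int) 2 = (m : Int) % 2 := by
      show Int.fmod _ _ = _
      rw [Int.fmod_eq_emod]
      norm_num
    rw [h]
    omega
  simp only [esPar, h2]
  rcases Nat.mod_two_eq_zero_or_one m with h | h <;> simp [h]

theorem loopEven_eq (k : Nat) : ∀ (n : Int) (m : Nat),
    loopEven (k : Int) n m = n + 10 ^ m * keptVal true (Nat.digits 10 k) := by
  induction k using Nat.strong_induction_on with
  | _ k ih =>
    intro n m
    by_cases hk : k = 0
    · subst hk
      rw [loopEven]
      simp [keptVal]
    · have hkpos : (0:Int) < (k : Int) := by exact_mod_cast Nat.pos_of_ne_zero hk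
      rw [loopEven, dif_pos hkpos, fmod_cast10, fdiv_cast10, esPar_cast]
      have hdig : Nat.digits 10 k = k % 10 :: Nat.digits 10 (k / 10) :=
        Nat.digits_def' (by norm_num) (Nat.pos_of_ne_zero hk)
      have hlt : k / 10 < k := Nat.div_lt_self (Nat.pos_of_ne_zero hk) (by norm_num)
      rw [hdig, keptVal_cons]
      by_cases hp : k % 10 % 2 = 0
      · have hb : decide (k % 10 % 2 = 0) = true := decide_eq_true hp
        rw [if_pos (by rw [hb]; rfl), if_pos (by rw [hb]; rfl), ih (k / 10) hlt]
        ring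
      · have hb : decide (k % 10 % 2 = 0) = false := decide_eq_false hp
        rw [if_neg (by rw [hb]; simp), if_neg (by rw [hb]; simp), ih (k / 10) hlt]

theorem loopOdd_eq (k : Nat) : ∀ (n : Int) (m : Nat),
    loopOdd (k : Int) n m = n + 10 ^ m * keptVal false (Nat.digits 10 k) := by
  induction k using Nat.strong_induction_on with
  | _ k ih =>
    intro n m
    by_cases hk : k = 0
    · subst hk
      rw [loopOdd]
      simp [keptVal]
    · have hkpos : (0:Int) < (k : Int) := by exact_mod_cast Nat.pos_of_ne_zero hk
      rw [loopOdd, dif_pos hkpos, fmod_cast10, fdiv_cast10, esPar_cast]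
      have hdig : Nat.digits 10 k = k % 10 :: Nat.digits 10 (k / 10) :=
        Nat.digits_def' (by norm_num) (Nat.pos_of_ne_zero hk)
      have hlt : k / 10 < k := Nat.div_lt_self (Nat.pos_of_ne_zero hk) (by norm_num)
      rw [hdig, keptVal_cons]
      by_cases hp : k % 10 % 2 = 0
      · have hb : decide (k % 10 % 2 = 0) = true := decide_eq_true hp
        rw [if_neg (by rw [hb]; simp), if_neg (by rw [hb]; simp), ih (k / 10) hlt]
      · have hb : decide (k % 10 % 2 = 0) = false := decide_eq_false hp
        rw [if_pos (by rw [hb]; rfl), if_pos (by rw [hb]; rfl), ih (k / 10) hlt]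
        ring

theorem loop_nonpos_even (c n : Int) (m : Nat) (h : ¬ c > 0) : loopEven c n m = n := by
  rw [loopEven, dif_neg h]

theorem loop_nonpos_odd (c n : Int) (m : Nat) (h : ¬ c > 0) : loopOdd c n m = n := by
  rw [loopOdd, dif_neg h]

-- toDigitsCore unfolded into Mathlib's Nat.digits
theorem toDigitsCore_eq (k : Nat) : ∀ (fuel : Nat) (ds : List Char), k ≠ 0 → k ≤ fuel →
    Nat.toDigitsCore 10 fuel k ds = ((Nat.digits 10 k).map Nat.digitChar).reverse ++ ds := by
  induction k using Nat.strong_induction_on with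
  | _ k ih =>
    intro fuel ds hk hle
    match fuel with
    | 0 => omega
    | f + 1 =>
      have hdig : Nat.digits 10 k = k % 10 :: Nat.digits 10 (k / 10) :=
        Nat.digits_def' (by norm_num) (Nat.pos_of_ne_zero hk)
      rw [Nat.toDigitsCore]
      by_cases h0 : k / 10 = 0
      · rw [if_pos h0, hdig, h0]
        simp
      · rw [if_neg h0]
        have hlt : k / 10 < k := Nat.div_lt_self (Nat.pos_of_ne_zero hk) (by norm_num)
        rw [ih (k / 10) hlt f ((k % 10).digitChar :: ds) h0 (by omega)]
        rw [hdig]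
        simp

theorem toChars_pos (c : Int) (h : 0 < c) :
    PySem.Int.toChars c = ((Nat.digits 10 c.toNat).map Nat.digitChar).reverse := by
  have hneg : ¬ c < 0 := by omega
  simp only [PySem.Int.toChars, if_neg hneg, Nat.toDigits]
  rw [toDigitsCore_eq c.toNat (c.toNat + 1) [] (by omega) (by omega)]
  simp

-- per-digit facts (d < 10)
theorem digitChar_even (d : Nat) (h : d < 10) :
    ['0','2','4','6','8'].contains (Nat.digitChar d) = decide (d % 2 = 0) := by
  interval_cases d <;> decide

theorem digitChar_odd (d : Nat) (h : d < 10) :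
    ['1','3','5','7','9'].contains (Nat.digitChar d) = decide (d % 2 = 1) := by
  interval_cases d <;> decide

theorem digitChar_toNat (d : Nat) (h : d < 10) :
    ((Nat.digitChar d).toNat : Int) - 48 = (d : Int) := by
  interval_cases d <;> decide

-- B's fold over the reversed digit-character list computes keptVal
theorem foldrB_eq (keep : List Char) (keepEven : Bool)
    (hkeep : ∀ d : Nat, d < 10 → (keep.contains (Nat.digitChar d) = ((decide (d % 2 = 0)) == keepEven)))
    (l : List Nat) (hl : ∀ d ∈ l, d < 10) :
    l.foldr (fun d y => if keep.contains (Nat.digitChar d)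
        then y * 10 + ((Nat.digitChar d).toNat : Int) - 48 else y) 0
      = keptVal keepEven l := by
  induction l with
  | nil => simp [keptVal]
  | cons d l ihl =>
    have hd : d < 10 := hl d (by simp)
    have ihl' := ihl (fun x hx => hl x (by simp [hx]))
    simp only [List.foldr_cons, keptVal, List.foldr_cons] at *
    rw [ihl', hkeep d hd]
    by_cases hp : (decide (d % 2 = 0)) == keepEven
    · rw [if_pos hp, if_pos hp]
      have := digitChar_toNat d hd
      ring_nf
      omega
    · rw [if_neg hp, if_neg hp]

theorem foldB_eq (keep : List Char) (keepEven : Bool)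
    (hkeep : ∀ d : Nat, d < 10 → (keep.contains (Nat.digitChar d) = ((decide (d % 2 = 0)) == keepEven)))
    (l : List Nat) (hl : ∀ d ∈ l, d < 10) :
    ((l.map Nat.digitChar).reverse).foldl
      (fun n ch => if keep.contains ch then n * 10 + (ch.toNat : Int) - 48 else n) 0
      = keptVal keepEven l := by
  rw [List.foldl_reverse, List.foldr_map]
  exact foldrB_eq keep keepEven hkeep l hl

theorem digits_lt (k : Nat) : ∀ d ∈ Nat.digits 10 k, d < 10 := fun d hd =>
  Nat.digits_lt_base (by norm_num) hd

-- core equality, stated over the already-computed cifra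
theorem core_eq (c p3 : Int) :
    (if p3 == 0 then loopEven c 0 0 else loopOdd c 0 0) =
      (if c ≤ 0 then 0 else
        (PySem.Int.toChars c).foldl
          (fun n ch => if (if p3 == 0 then ['0','2','4','6','8'] else ['1','3','5','7','9']).contains ch
            then n * 10 + (ch.toNat : Int) - 48 else n) 0) := by
  by_cases hc0 : c ≤ 0
  · rw [if_pos hc0]
    have h' : ¬ c > 0 := by omega
    by_cases h3 : p3 = 0
    · simp [h3, loop_nonpos_even _ _ _ h']
    · simp [h3, loop_nonpos_odd _ _ _ h']
  · have hcpos : 0 < c := by omega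
    rcases Int.eq_ofNat_of_zero_le (le_of_lt hcpos) with ⟨k, rfl⟩
    have hk : 0 < k := by exact_mod_cast hcpos
    rw [if_neg hc0, toChars_pos _ hcpos, Int.toNat_natCast]
    by_cases h3 : p3 = 0
    · simp only [h3, beq_self_eq_true, if_true]
      rw [foldB_eq _ true
        (fun d hd => by rw [digitChar_even d hd]; cases h : decide (d % 2 = 0) <;> simp)
        _ (digits_lt k)]
      rw [loopEven_eq k 0 0]
      ring
    · have h3' : (p3 == 0) = false := by simp [h3]
      simp only [h3', Bool.false_eq_true, if_false]
      rw [foldB_eq _ false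
        (fun d hd => by
          rw [digitChar_odd d hd]
          rcases Nat.mod_two_eq_zero_or_one d with h | h <;> simp [h])
        _ (digits_lt k)]
      rw [loopOdd_eq k 0 0]
      ring

-- ===== VERDICT (by name: the statement is the Claim_ definition above) =====
theorem obtenerValores_spec : Claim_equal_obtenerValores := by
  intro p1 p2 p3 _ _
  exact core_eq (PySem.Int.floordiv p1 (10 ^ (p2 - 1).toNat)) p3
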